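-- pv_equiv track=rewrite | github.com/velmurugan729/support-ticket-env | inference.py | parse_department
-- ===== SOURCE A (Python) =====
-- VALID_DEPARTMENTS = ["Billing", "Technical", "Shipping", "Returns", "General"]
--
-- def parse_department(raw_response: str) -> str:
--     """
--     Parse the LLM response to extract only the clean department name.
--     Handles cases where LLM adds reasoning or extra text.
--     """
--     if not raw_response:
--         return "General"
--
--     # Clean the response
--     cleaned = raw_response.strip()
--
--     # Try to find an exact department match (case-insensitive)
--     cleaned_lower = cleaned.lower()
--
--     # Check for exact match first
--     for dept in VALID_DEPARTMENTS:
--         if cleaned_lower == dept.lower():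
--             return dept
--
--     # Check if any department name appears in the response
--     for dept in VALID_DEPARTMENTS:
--         if dept.lower() in cleaned_lower:
--             return dept
--
--     # Default to General if no match found
--     return "General"
-- ===== SOURCE B (Python) =====
-- VALID_DEPARTMENTS = ["Billing", "Technical", "Shipping", "Returns", "General"]
--
-- def parse_department(raw_response: str) -> str:
--     if not raw_response:
--         return "General"
--     cleaned_lower = raw_response.strip().lower()
--     return next((d for d in VALID_DEPARTMENTS if d.lower() in cleaned_lower), "General")
-- ===== Notes on version B (the rewrite author's own statement) =====
-- stated objective: simpler
-- what changed: Replaced A's two sequential scans (exact match, then substring) by one substring scan; correct because an exact match is a substring match and no department name is a substring of another, so the exact-first priority never changes the result.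
import Mathlib
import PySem

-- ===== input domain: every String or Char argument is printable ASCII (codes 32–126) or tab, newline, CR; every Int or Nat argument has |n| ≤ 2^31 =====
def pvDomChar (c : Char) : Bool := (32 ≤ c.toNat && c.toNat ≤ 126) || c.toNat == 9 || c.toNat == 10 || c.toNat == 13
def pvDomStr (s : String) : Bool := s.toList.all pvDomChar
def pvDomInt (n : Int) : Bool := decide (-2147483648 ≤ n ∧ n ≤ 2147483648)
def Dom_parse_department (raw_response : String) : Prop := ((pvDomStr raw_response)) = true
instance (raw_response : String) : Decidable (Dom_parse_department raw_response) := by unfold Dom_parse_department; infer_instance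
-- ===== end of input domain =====

-- B replaces A's two sequential scans by a single substring scan (simpler; same result
-- because no department name is a substring of another).

def VALID_DEPARTMENTS : List String := ["Billing", "Technical", "Shipping", "Returns", "General"]

-- ===== PORT A =====
-- first loop of A: return the first dept with cleaned_lower == dept.lower()
def pvExactLoop : List String → String → Option String
  | [], _ => none
  | dept :: rest, t => if t == PySem.Str.lower dept then some dept else pvExactLoop rest t

-- second loop of A: return the first dept with dept.lower() in cleaned_lower
def pvSubLoop : List String → String → Option String
  | [], _ => none
  | dept :: rest, t => if PySem.Str.isIn (PySem.Str.lower dept) t then some dept else pvSubLoop rest t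

def parse_department (raw_response : String) : String :=
  if raw_response == "" then "General"
  else
    let cleaned := PySem.Str.strip raw_response
    let cleaned_lower := PySem.Str.lower cleaned
    match pvExactLoop VALID_DEPARTMENTS cleaned_lower with
    | some dept => dept
    | none =>
      match pvSubLoop VALID_DEPARTMENTS cleaned_lower with
      | some dept => dept
      | none => "General"

-- ===== PORT B =====
def parse_department_alt (raw_response : String) : String :=
  if raw_response == "" then "General"
  else
    let cleaned_lower := PySem.Str.lower (PySem.Str.strip raw_response)
    (VALID_DEPARTMENTS.find? (fun d => PySem.Str.isIn (PySem.Str.lower d) cleaned_lower)).getD "General"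

-- ===== PRECONDITION & SPEC =====
def Spec_parse_department (raw_response : String) (out : String) : Prop := out = parse_department_alt raw_response
instance (raw_response : String) (out : String) : Decidable (Spec_parse_department raw_response out) := by unfold Spec_parse_department; infer_instance

-- ===== CLAIM (what is proved, stated in full; the proofs are below) =====
def Claim_equal_parse_department : Prop := ∀ (raw_response : String), Dom_parse_department raw_response → Spec_parse_department raw_response (parse_department raw_response)

-- ===== LEMMAS AND PROOFS =====

-- A's second loop is exactly B's single scan
theorem pvSubLoop_eq_find (l : List String) (t : String) :
    (match pvSubLoop l t with
     | some dept => dept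
     | none => "General") =
    (l.find? (fun d => PySem.Str.isIn (PySem.Str.lower d) t)).getD "General" := by
  induction l with
  | nil => rfl
  | cons d rest ih =>
    simp only [pvSubLoop, List.find?, PySem.Str.isIn_eq]
    by_cases h : PySem.Chars.isIn (PySem.Chars.lower d.toList) t.toList = true
    · simp [h]
    · simp only [Bool.not_eq_true] at h
      simpa [h, PySem.Str.isIn_eq] using ih

-- core agreement on the cleaned, lowercased string
theorem pvCore_eq (t : String) :
    (match pvExactLoop VALID_DEPARTMENTS t with
     | some dept => dept
     | none =>
       match pvSubLoop VALID_DEPARTMENTS t with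
       | some dept => dept
       | none => "General") =
    (VALID_DEPARTMENTS.find? (fun d => PySem.Str.isIn (PySem.Str.lower d) t)).getD "General" := by
  simp only [VALID_DEPARTMENTS, pvExactLoop]
  split_ifs with h1 h2 h3 h4 h5
  · rw [eq_of_beq h1]; decide
  · rw [eq_of_beq h2]; decide
  · rw [eq_of_beq h3]; decide
  · rw [eq_of_beq h4]; decide
  · rw [eq_of_beq h5]; decide
  · exact pvSubLoop_eq_find VALID_DEPARTMENTS t

-- ===== VERDICT (by name: the statement is the Claim_ definition above) =====
theorem parse_department_spec : Claim_equal_parse_department := by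
  intro raw_response _
  unfold Spec_parse_department parse_department parse_department_alt
  by_cases h : raw_response == ""
  · simp [h]
  · simp only [Bool.not_eq_true] at h
    simp only [h, Bool.false_eq_true, if_false]
    exact pvCore_eq (PySem.Str.lower (PySem.Str.strip raw_response))
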